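-- pv_equiv track=rewrite | github.com/sjlee9908/coding-test-practice | 백준/14698.py | get_min_electric
-- ===== SOURCE A (Python) =====
-- import heapq
--
-- def get_min_electric(slimes):
--     electric = 1
--     heapq.heapify(slimes)
--     while len(slimes) > 1:
--         s1 = heapq.heappop(slimes)
--         s2 = heapq.heappop(slimes)
--
--         heapq.heappush(slimes, s1 * s2)
--
--         electric *= (s1 * s2)
--         electric %= 1000000007
--
--     return electric
-- ===== SOURCE B (Python) =====
-- # Two-queue Huffman merge: sort once, then repeatedly take the two smallest
-- # available values from the FRONTS of two queues (sorted leaves / merged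
-- # products) instead of a heap. Note: A mutates `slimes` in place (heapify/pop);
-- # B does not -- only the return value is claimed equal.
-- def get_min_electric(slimes):
--     leaves = sorted(slimes)
--     merged = []
--     i = j = 0
--     electric = 1
--
--     def pop_min():
--         nonlocal i, j
--         if j == len(merged) or (i < len(leaves) and leaves[i] <= merged[j]):
--             i += 1
--             return leaves[i - 1]
--         j += 1
--         return merged[j - 1]
--
--     while (len(leaves) - i) + (len(merged) - j) > 1:
--         s1 = pop_min()
--         s2 = pop_min()
--         merged.append(s1 * s2)
--         electric = electric * (s1 * s2) % 1000000007
--     return electric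
-- ===== Notes on version B (the rewrite author's own statement) =====
-- stated objective: alternative
-- what changed: Replaces the heap's repeated min-extraction by the two-queue Huffman technique: sort once, then pop minima from the fronts of a sorted-leaf queue and a FIFO queue of merged products (the merged products are nondecreasing for nonnegative inputs), so the merge phase does no heap operations or insertions at all.
-- outside the precondition, e.g. on get_min_electric([-3, -2, 1, 1, 2]): A returns 144, B returns 864
import Mathlib
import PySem

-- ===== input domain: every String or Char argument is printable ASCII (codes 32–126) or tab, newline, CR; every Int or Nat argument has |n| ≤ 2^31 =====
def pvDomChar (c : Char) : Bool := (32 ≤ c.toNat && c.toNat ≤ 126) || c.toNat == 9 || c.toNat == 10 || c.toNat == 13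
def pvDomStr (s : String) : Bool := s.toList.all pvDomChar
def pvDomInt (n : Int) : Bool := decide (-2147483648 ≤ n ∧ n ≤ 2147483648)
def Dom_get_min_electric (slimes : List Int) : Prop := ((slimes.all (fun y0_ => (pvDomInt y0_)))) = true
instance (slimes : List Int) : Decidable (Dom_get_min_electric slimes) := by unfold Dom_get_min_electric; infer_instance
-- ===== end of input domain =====

-- B replaces the heap by the two-queue Huffman technique (sort once, pop minima from the
-- fronts of a leaf queue and a merged-product queue); equal RETURN value on nonnegative
-- inputs (Pre_). A mutates its argument in place via heapq; B does not — only the return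
-- value is claimed equal.

-- ===== PORT A =====
-- heapq is modelled by its pop-min semantics: heappop returns the minimum of the heap and
-- removes one occurrence of it; heappush adds the element; heapify only reorders (identity on
-- the multiset). This is exact for the RETURN value, which depends only on the popped values.
def pyHeapPop (l : List Int) : Int × List Int :=
  match PySem.List.min? l (fun x => x) with
  | some m => (m, l.erase m)
  | none => (0, [])  -- unreachable: A never pops an empty heap (guarded by len > 1)

-- A's while-loop; the fuel argument is only a structural totality guard (each iteration
-- shortens the list by one, so fuel = initial length never runs out)
def aLoop : Nat → List Int → Int → Int
  | 0, _, e => e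
  | fuel + 1, l, e =>
    if 1 < l.length then
      let p1 := pyHeapPop l
      let p2 := pyHeapPop p1.2
      aLoop fuel (p1.1 * p2.1 :: p2.2) (PySem.Int.mod (e * (p1.1 * p2.1)) 1000000007)
    else e

def get_min_electric (slimes : List Int) : Int :=
  aLoop slimes.length slimes 1

-- ===== PORT B =====
-- Source B's pop_min: take the front of the leaf queue or of the merged queue, whichever is
-- smaller (the leaf queue wins ties, as in `leaves[i] <= merged[j]`); index-front popping in
-- Source B is head-popping here.
def popMin (q1 q2 : List Int) : Int × List Int × List Int :=
  match q1, q2 with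
  | [], [] => (0, [], [])  -- unreachable: pop_min is never called with both queues empty
  | x :: t1, [] => (x, t1, [])
  | [], m :: t2 => (m, [], t2)
  | x :: t1, m :: t2 => if x ≤ m then (x, t1, m :: t2) else (m, x :: t1, t2)

-- Source B's while-loop over the two queues; fuel is again only a totality guard
def bLoop : Nat → List Int → List Int → Int → Int
  | 0, _, _, e => e
  | fuel + 1, q1, q2, e =>
    if 1 < q1.length + q2.length then
      let p1 := popMin q1 q2
      let p2 := popMin p1.2.1 p1.2.2
      bLoop fuel p2.2.1 (p2.2.2 ++ [p1.1 * p2.1]) (PySem.Int.mod (e * (p1.1 * p2.1)) 1000000007)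
    else e

def get_min_electric_alt (slimes : List Int) : Int :=
  bLoop (PySem.List.sorted slimes (fun x => x) false).length
    (PySem.List.sorted slimes (fun x => x) false) [] 1

-- ===== PRECONDITION & SPEC =====
-- Pre_ restricts to the problem's natural domain (BOJ 14698: slime energies are positive
-- integers): on lists containing a negative value A still returns, but the merged-product
-- queue is then no longer nondecreasing, so B's queue-front greedy merges in a different,
-- equally defensible order and the two values can differ.
def Pre_get_min_electric (slimes : List Int) : Prop := ∀ x ∈ slimes, 0 ≤ x
instance (slimes : List Int) : Decidable (Pre_get_min_electric slimes) := by
  unfold Pre_get_min_electric; infer_instance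

def pvWitness_get_min_electric : List Int := [2, 3, 5]

def Spec_get_min_electric (slimes : List Int) (out : Int) : Prop := out = get_min_electric_alt slimes
instance (slimes : List Int) (out : Int) : Decidable (Spec_get_min_electric slimes out) := by unfold Spec_get_min_electric; infer_instance

-- ===== CLAIM (what is proved, stated in full; the proofs are below) =====
def Claim_equal_get_min_electric : Prop := ∀ (slimes : List Int), Dom_get_min_electric slimes → Pre_get_min_electric slimes → Spec_get_min_electric slimes (get_min_electric slimes)

-- ===== LEMMAS AND PROOFS =====

theorem popMin_length (q1 q2 : List Int) (h : q1.length + q2.length ≠ 0) :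
    (popMin q1 q2).2.1.length + (popMin q1 q2).2.2.length + 1 = q1.length + q2.length := by
  match q1, q2 with
  | [], [] => simp at h
  | x :: t1, [] => simp [popMin]
  | [], m :: t2 => simp [popMin]
  | x :: t1, m :: t2 =>
      simp only [popMin]
      split <;> simp <;> omega

theorem min?_id_char (l : List Int) (h : l ≠ []) :
    ∃ m, PySem.List.min? l (fun x => x) = some m ∧ m ∈ l ∧ ∀ y ∈ l, m ≤ y := by
  cases hm : PySem.List.min? l (fun x => x) with
  | none => exact absurd ((PySem.List.min?_eq_none_iff _ _).mp hm) h
  | some m => exact ⟨m, rfl, PySem.List.min?_mem hm, fun y hy => PySem.List.min?_isMin hm y hy⟩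

-- the minimum VALUE is the same for permuted lists
theorem min?_id_perm (l l' : List Int) (hp : l.Perm l') {m m' : Int}
    (h : PySem.List.min? l (fun x => x) = some m)
    (h' : PySem.List.min? l' (fun x => x) = some m') : m = m' := by
  have hm : m ∈ l := PySem.List.min?_mem h
  have hm' : m' ∈ l' := PySem.List.min?_mem h'
  exact le_antisymm (PySem.List.min?_isMin h m' (hp.symm.mem_iff.mp hm'))
    (PySem.List.min?_isMin h' m (hp.mem_iff.mp hm))

theorem aLoop_perm : ∀ (fuel : Nat) (l l' : List Int) (e : Int),
    l.Perm l' → aLoop fuel l e = aLoop fuel l' e := by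
  intro fuel
  induction fuel with
  | zero => intro l l' e _; rfl
  | succ fuel ih =>
    intro l l' e hp
    have hlen : l'.length = l.length := hp.length_eq.symm
    by_cases h1 : 1 < l.length
    · have hne : l ≠ [] := by intro h; subst h; simp at h1
      have hne' : l' ≠ [] := by intro h; subst h; simp at hlen; omega
      obtain ⟨m, hm, hmem, hmin⟩ := min?_id_char l hne
      obtain ⟨m', hm', hmem', hmin'⟩ := min?_id_char l' hne'
      have hmm : m = m' := min?_id_perm l l' hp hm hm'
      subst hmm
      have hp1 : (l.erase m).Perm (l'.erase m) := hp.erase m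
      have hlen1 : (l.erase m).length = l.length - 1 := by
        have := List.length_erase_of_mem hmem; omega
      have hne1 : l.erase m ≠ [] := by
        intro h; rw [h] at hlen1; simp at hlen1; omega
      have hne1' : l'.erase m ≠ [] := by
        intro h
        have h4 := hp1.length_eq
        rw [h] at h4
        simp only [List.length_nil] at h4
        omega
      obtain ⟨k, hk, hkmem, hkmin⟩ := min?_id_char (l.erase m) hne1
      obtain ⟨k', hk', hkmem', hkmin'⟩ := min?_id_char (l'.erase m) hne1'
      have hkk : k = k' := min?_id_perm _ _ hp1 hk hk'
      subst hkk
      have e1 : pyHeapPop l = (m, l.erase m) := by unfold pyHeapPop; rw [hm]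
      have e1' : pyHeapPop l' = (m, l'.erase m) := by unfold pyHeapPop; rw [hm']
      have e2 : pyHeapPop (l.erase m) = (k, (l.erase m).erase k) := by
        unfold pyHeapPop; rw [hk]
      have e2' : pyHeapPop (l'.erase m) = (k, (l'.erase m).erase k) := by
        unfold pyHeapPop; rw [hk']
      simp only [aLoop, if_pos h1, if_pos (show 1 < l'.length by omega), e1, e1', e2, e2']
      have hp2 : ((l.erase m).erase k).Perm ((l'.erase m).erase k) := hp1.erase k
      exact ih _ _ _ (hp2.cons (m * k))
    · simp only [aLoop, if_neg h1, if_neg (show ¬ 1 < l'.length by omega)]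

-- what one pop_min does on sorted queues: it returns the minimum value of the combined
-- multiset, removes one occurrence of it, keeps both remainders sorted, within the queues
theorem popMin_char (q1 q2 : List Int) (h1 : q1.Pairwise (· ≤ ·)) (h2 : q2.Pairwise (· ≤ ·))
    (hne : q1.length + q2.length ≠ 0) :
    ((popMin q1 q2).1 :: ((popMin q1 q2).2.1 ++ (popMin q1 q2).2.2)).Perm (q1 ++ q2) ∧
    (∀ y ∈ q1 ++ q2, (popMin q1 q2).1 ≤ y) ∧
    (popMin q1 q2).2.1.Pairwise (· ≤ ·) ∧ (popMin q1 q2).2.2.Pairwise (· ≤ ·) ∧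
    (∀ x ∈ (popMin q1 q2).2.1, x ∈ q1) ∧ (∀ x ∈ (popMin q1 q2).2.2, x ∈ q2) := by
  match q1, q2 with
  | [], [] => simp at hne
  | x :: t1, [] =>
      rcases List.pairwise_cons.mp h1 with ⟨hx, ht1⟩
      refine ⟨by simp [popMin], ?_, by simpa [popMin] using ht1, by simp [popMin], ?_, ?_⟩
      · intro y hy
        simp only [popMin]
        rcases List.mem_append.mp hy with hy1 | hy2
        · rcases List.mem_cons.mp hy1 with rfl | hyt
          · exact le_refl _
          · exact hx y hyt
        · simp at hy2
      · intro z hz; simp only [popMin] at hz; exact List.mem_cons_of_mem _ hz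
      · intro z hz; simp only [popMin] at hz; simp at hz
  | [], m :: t2 =>
      rcases List.pairwise_cons.mp h2 with ⟨hm, ht2⟩
      refine ⟨by simp [popMin], ?_, by simp [popMin], by simpa [popMin] using ht2, ?_, ?_⟩
      · intro y hy
        simp only [popMin]
        simp only [List.nil_append] at hy
        rcases List.mem_cons.mp hy with rfl | hyt
        · exact le_refl _
        · exact hm y hyt
      · intro z hz; simp only [popMin] at hz; simp at hz
      · intro z hz; simp only [popMin] at hz; exact List.mem_cons_of_mem _ hz
  | x :: t1, m :: t2 =>
      rcases List.pairwise_cons.mp h1 with ⟨hx, ht1⟩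
      rcases List.pairwise_cons.mp h2 with ⟨hm, ht2⟩
      by_cases hxm : x ≤ m
      · have hpop : popMin (x :: t1) (m :: t2) = (x, t1, m :: t2) := by
          simp [popMin, hxm]
        rw [hpop]
        refine ⟨by simp, ?_, ht1, h2, ?_, ?_⟩
        · intro y hy
          rcases List.mem_append.mp hy with hy1 | hy2
          · rcases List.mem_cons.mp hy1 with rfl | hyt
            · exact le_refl _
            · exact hx y hyt
          · rcases List.mem_cons.mp hy2 with rfl | hyt
            · exact hxm
            · exact le_trans hxm (hm y hyt)
        · intro z hz; exact List.mem_cons_of_mem _ hz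
        · intro z hz; exact hz
      · have hpop : popMin (x :: t1) (m :: t2) = (m, x :: t1, t2) := by
          simp [popMin, hxm]
        rw [hpop]
        refine ⟨List.perm_middle.symm, ?_, h1, ht2, ?_, ?_⟩
        · intro y hy
          rcases List.mem_append.mp hy with hy1 | hy2
          · rcases List.mem_cons.mp hy1 with rfl | hyt
            · omega
            · exact le_trans (by omega) (hx y hyt)
          · rcases List.mem_cons.mp hy2 with rfl | hyt
            · exact le_refl _
            · exact hm y hyt
        · intro z hz; exact hz
        · intro z hz; exact List.mem_cons_of_mem _ hz

-- the product of the two minima popped by Source B's merge step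
def minProd (q1 q2 : List Int) : Int :=
  (popMin q1 q2).1 * (popMin (popMin q1 q2).2.1 (popMin q1 q2).2.2).1

-- the product of the two current minima never decreases across a merge step (nonneg inputs):
-- if every element of the state is either the freshly appended product v1*v2 or ≥ v2, the
-- next two popped minima a, b satisfy v1*v2 ≤ a*b
theorem minProd_ge (q1 q2 : List Int) (v1 v2 : Int)
    (h1 : q1.Pairwise (· ≤ ·)) (h2 : q2.Pairwise (· ≤ ·))
    (hlen : 1 < q1.length + q2.length)
    (hv1 : 0 ≤ v1) (hv2 : 0 ≤ v2) (hv12 : v1 ≤ v2)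
    (helem : ∀ z ∈ q1 ++ q2, z = v1 * v2 ∨ v2 ≤ z)
    (hnn : ∀ z ∈ q1 ++ q2, 0 ≤ z) :
    v1 * v2 ≤ minProd q1 q2 := by
  obtain ⟨hperm, hmin, hr1, hr2, hs1, hs2⟩ := popMin_char q1 q2 h1 h2 (by omega)
  have hlen1 := popMin_length q1 q2 (by omega)
  obtain ⟨hperm', hmin', _, _, hs1', hs2'⟩ :=
    popMin_char (popMin q1 q2).2.1 (popMin q1 q2).2.2 hr1 hr2 (by omega)
  set a := (popMin q1 q2).1 with ha
  set b := (popMin (popMin q1 q2).2.1 (popMin q1 q2).2.2).1 with hb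
  have hamem : a ∈ q1 ++ q2 := hperm.mem_iff.mp (List.mem_cons_self ..)
  have hbrem : b ∈ (popMin q1 q2).2.1 ++ (popMin q1 q2).2.2 :=
    hperm'.mem_iff.mp (List.mem_cons_self ..)
  have hbmem : b ∈ q1 ++ q2 := by
    rcases List.mem_append.mp hbrem with hbl | hbr
    · exact List.mem_append.mpr (Or.inl (hs1 b hbl))
    · exact List.mem_append.mpr (Or.inr (hs2 b hbr))
  have hanneg : 0 ≤ a := hnn a hamem
  have hbnneg : 0 ≤ b := hnn b hbmem
  show v1 * v2 ≤ a * b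
  rcases (show v1 = 0 ∨ 1 ≤ v1 by omega) with hz | ho
  · subst hz
    simpa using mul_nonneg hanneg hbnneg
  · have hsv2 : v2 ≤ v1 * v2 := le_mul_of_one_le_left hv2 ho
    have hav2 : v2 ≤ a := by
      rcases helem a hamem with h | h
      · rw [h]; exact hsv2
      · exact h
    have hbv2 : v2 ≤ b := by
      rcases helem b hbmem with h | h
      · rw [h]; exact hsv2
      · exact h
    calc v1 * v2 ≤ v2 * v2 := mul_le_mul_of_nonneg_right hv12 hv2
      _ ≤ a * b := mul_le_mul hav2 hbv2 hv2 hanneg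

-- the heap loop on the combined multiset equals the two-queue loop, given the two-queue
-- invariant: both queues sorted, all values nonnegative, and every merged-queue element is
-- at most the product of the two current minima
theorem aLoop_eq_bLoop : ∀ (fuel : Nat) (q1 q2 : List Int) (e : Int),
    q1.Pairwise (· ≤ ·) → q2.Pairwise (· ≤ ·) →
    (∀ x ∈ q1 ++ q2, 0 ≤ x) →
    (1 < q1.length + q2.length → ∀ x ∈ q2, x ≤ minProd q1 q2) →
    aLoop fuel (q1 ++ q2) e = bLoop fuel q1 q2 e := by
  intro fuel
  induction fuel with
  | zero => intro q1 q2 e _ _ _ _; rfl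
  | succ fuel ih =>
    intro q1 q2 e h1 h2 hnn hbnd
    by_cases hgt : 1 < q1.length + q2.length
    · obtain ⟨hperm, hmin, hr1, hr2, hs1, hs2⟩ := popMin_char q1 q2 h1 h2 (by omega)
      have hlen1 := popMin_length q1 q2 (by omega)
      obtain ⟨hperm', hmin', hr1', hr2', hs1', hs2'⟩ :=
        popMin_char (popMin q1 q2).2.1 (popMin q1 q2).2.2 hr1 hr2 (by omega)
      have hlen2 := popMin_length (popMin q1 q2).2.1 (popMin q1 q2).2.2 (by omega)
      set v1 := (popMin q1 q2).1 with hv1def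
      set r1 := (popMin q1 q2).2.1 with hr1def
      set r2 := (popMin q1 q2).2.2 with hr2def
      set v2 := (popMin r1 r2).1 with hv2def
      set r1' := (popMin r1 r2).2.1 with hr1'def
      set r2' := (popMin r1 r2).2.2 with hr2'def
      -- A's first pop yields the same value v1
      have hne : q1 ++ q2 ≠ [] := by
        intro h
        have := congrArg List.length h
        simp only [List.length_append, List.length_nil] at this
        omega
      obtain ⟨m, hm, hmmem, hmmin⟩ := min?_id_char (q1 ++ q2) hne
      have hv1mem : v1 ∈ q1 ++ q2 := hperm.mem_iff.mp (List.mem_cons_self ..)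
      have hmv1 : m = v1 := le_antisymm (hmmin v1 hv1mem) (hmin m hmmem)
      subst hmv1
      have he1 : pyHeapPop (q1 ++ q2) = (v1, (q1 ++ q2).erase v1) := by
        unfold pyHeapPop; rw [hm]
      -- the remainders agree up to permutation
      have hpr : (r1 ++ r2).Perm ((q1 ++ q2).erase v1) :=
        (List.cons_perm_iff_perm_erase.mp hperm).2
      -- A's second pop yields the same value v2
      have hlenerase : ((q1 ++ q2).erase v1).length + 1 = q1.length + q2.length := by
        have := List.length_erase_of_mem hv1mem
        simp only [List.length_append] at this ⊢
        omega
      have hne2 : (q1 ++ q2).erase v1 ≠ [] := by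
        intro h
        rw [h] at hlenerase
        simp only [List.length_nil] at hlenerase
        omega
      obtain ⟨k, hk, hkmem, hkmin⟩ := min?_id_char ((q1 ++ q2).erase v1) hne2
      have hv2mem : v2 ∈ r1 ++ r2 := hperm'.mem_iff.mp (List.mem_cons_self ..)
      have hkv2 : k = v2 := le_antisymm (hkmin v2 (hpr.mem_iff.mp hv2mem))
        (hmin' k (hpr.symm.mem_iff.mp hkmem))
      subst hkv2
      have he2 : pyHeapPop ((q1 ++ q2).erase v1) = (v2, ((q1 ++ q2).erase v1).erase v2) := by
        unfold pyHeapPop; rw [hk]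
      -- memberships in the original state
      have hmemq : ∀ z, z ∈ r1 ++ r2 → z ∈ q1 ++ q2 := by
        intro z hz
        rcases List.mem_append.mp hz with h | h
        · exact List.mem_append.mpr (Or.inl (hs1 z h))
        · exact List.mem_append.mpr (Or.inr (hs2 z h))
      have hmemr : ∀ z, z ∈ r1' ++ r2' → z ∈ r1 ++ r2 := by
        intro z hz
        rcases List.mem_append.mp hz with h | h
        · exact List.mem_append.mpr (Or.inl (hs1' z h))
        · exact List.mem_append.mpr (Or.inr (hs2' z h))
      have hv2q : v2 ∈ q1 ++ q2 := hmemq v2 hv2mem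
      have hv1nn : 0 ≤ v1 := hnn v1 hv1mem
      have hv2nn : 0 ≤ v2 := hnn v2 hv2q
      have hv12 : v1 ≤ v2 := hmin v2 hv2q
      have hsnn : 0 ≤ v1 * v2 := mul_nonneg hv1nn hv2nn
      have hminprod : minProd q1 q2 = v1 * v2 := rfl
      -- unfold both loops one step
      have hga : 1 < (q1 ++ q2).length := by simp only [List.length_append]; omega
      simp only [aLoop, bLoop, if_pos hga, if_pos hgt, he1, he2,
        ← hv1def, ← hr1def, ← hr2def, ← hv2def, ← hr1'def, ← hr2'def]
      -- A's new list is a permutation of B's new combined state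
      have hpr2 : (r1' ++ r2').Perm (((q1 ++ q2).erase v1).erase v2) :=
        (List.cons_perm_iff_perm_erase.mp (hperm'.trans hpr)).2
      have hpnew : (v1 * v2 :: ((q1 ++ q2).erase v1).erase v2).Perm
          (r1' ++ (r2' ++ [v1 * v2])) := by
        refine ((hpr2.symm.cons (v1 * v2)).trans ?_)
        rw [← List.append_assoc]
        exact (List.perm_append_singleton _ _).symm
      rw [aLoop_perm fuel _ _ _ hpnew]
      -- invariant for the new state
      have hxle : ∀ x ∈ r2', x ≤ v1 * v2 := fun x hx =>
        hminprod ▸ hbnd hgt x (hs2 x (hs2' x hx))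
      have h2' : (r2' ++ [v1 * v2]).Pairwise (· ≤ ·) := by
        rw [List.pairwise_append]
        exact ⟨hr2', List.pairwise_singleton _ _,
          fun a ha b hb => by rw [List.mem_singleton.mp hb]; exact hxle a ha⟩
      have hnn' : ∀ x ∈ r1' ++ (r2' ++ [v1 * v2]), 0 ≤ x := by
        intro x hx
        rcases List.mem_append.mp hx with h | h
        · exact hnn x (hmemq x (hmemr x (List.mem_append.mpr (Or.inl h))))
        · rcases List.mem_append.mp h with h | h
          · exact hnn x (hmemq x (hmemr x (List.mem_append.mpr (Or.inr h))))
          · rw [List.mem_singleton.mp h]; exact hsnn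
      have hbnd' : 1 < r1'.length + (r2' ++ [v1 * v2]).length → ∀ x ∈ r2' ++ [v1 * v2],
          x ≤ minProd r1' (r2' ++ [v1 * v2]) := by
        intro hgt' x hx
        have hkey : v1 * v2 ≤ minProd r1' (r2' ++ [v1 * v2]) := by
          refine minProd_ge r1' (r2' ++ [v1 * v2]) v1 v2 hr1' h2' hgt' hv1nn hv2nn hv12 ?_ ?_
          · intro z hz
            rcases List.mem_append.mp hz with h | h
            · exact Or.inr (hmin' z (List.mem_append.mpr (Or.inl (hs1' z h))))
            · rcases List.mem_append.mp h with h | h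
              · exact Or.inr (hmin' z (List.mem_append.mpr (Or.inr (hs2' z h))))
              · exact Or.inl (List.mem_singleton.mp h)
          · intro z hz; exact hnn' z hz
        rcases List.mem_append.mp hx with h | h
        · exact le_trans (hxle x h) hkey
        · rw [List.mem_singleton.mp h]; exact hkey
      exact ih r1' (r2' ++ [v1 * v2]) _ hr1' h2' hnn' hbnd'
    · have hga : ¬ 1 < (q1 ++ q2).length := by simp only [List.length_append]; omega
      simp only [aLoop, bLoop, if_neg hga, if_neg hgt]

-- ===== VERDICT (by name: the statement is the Claim_ definition above) =====
theorem get_min_electric_spec : Claim_equal_get_min_electric := by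
  intro slimes _ hpre
  unfold Spec_get_min_electric get_min_electric get_min_electric_alt
  have hperm : slimes.Perm (PySem.List.sorted slimes (fun x => x) false) :=
    (PySem.List.sorted_perm slimes (fun x => x) false).symm
  have hpw : (PySem.List.sorted slimes (fun x => x) false).Pairwise (· ≤ ·) := by
    have := PySem.List.sorted_pairwise slimes (fun x => x)
    simpa using this
  rw [aLoop_perm slimes.length _ _ _ hperm, hperm.length_eq]
  have h := aLoop_eq_bLoop (PySem.List.sorted slimes (fun x => x) false).length
    (PySem.List.sorted slimes (fun x => x) false) [] 1 hpw (by simp)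
    (by
      intro x hx
      simp only [List.append_nil] at hx
      exact hpre x (hperm.symm.mem_iff.mp hx))
    (by intro _ x hx; simp at hx)
  simpa using h
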